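-- pv_equiv track=rewrite | github.com/JuEeHa/hynneflip | linguistics.py | parse_pastalie_verb
-- ===== SOURCE A (Python) =====
-- def parse_pastalie_verb(word):
-- 	root = ''
-- 	emotions = []
--
-- 	segment = ''
-- 	is_emotion = False
-- 	for character in word:
-- 		if not is_emotion and character in 'AIEUON':
-- 			# Level 1 emotion add it directy to emotions
-- 			# segment doesn't contain an emotion, add it to the root
-- 			# Add '.' to root to mark where the emotion was extracted from
-- 			# Start building a new root segment
-- 			emotions.append(character)
-- 			root += segment + '.'
-- 			segment = ''
--
-- 		elif not is_emotion and character in 'LY':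
-- 			# Either a level 2 or 3 emotion
-- 			# segment doesn't contain an emotion, add it to the root and start building a new segment that does
-- 			root += segment
-- 			segment = character
-- 			is_emotion = True
--
-- 		elif is_emotion:
-- 			# segment contains a start of an emotion already
--
-- 			if segment == 'L':
-- 				# A level 3 emotion, has to start with LY
-- 				if character == 'Y':
-- 					segment = 'LY'
--
-- 				else:
-- 					# Wasn't LY, so can't be an emotion, flip is_emotion to False, since this was a
-- 					# root segment after all
-- 					segment += character
-- 					is_emotion = False
--
-- 			elif segment == 'Y' or segment == 'LY':
-- 				# Prefix of either a level 2 or level 3 emotion is complete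
--
-- 				if character in 'AIEUON':
-- 					# character completes the emotion, add segment + character to emotions
-- 					# Add '.' to root to mark where the emotion was extracted from
-- 					# Start building a new root segment
-- 					emotions.append(segment + character)
-- 					root += '.'
-- 					segment = ''
-- 					is_emotion = False
--
-- 				else:
-- 					# Wasn't a valid level 2 or level 3 emotion word after all, flip is_emotion to
-- 					# False
-- 					segment += character
-- 					is_emotion = False
--
-- 		else:
-- 			# By default, just add to the segment
-- 			segment += character
--
-- 	# At the end, add what was left of the segment to the root
-- 	assert not is_emotion
-- 	root += segment
--
-- 	return root, emotions
-- ===== SOURCE B (Python) =====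
-- def parse_pastalie_verb(word):
-- 	# Index-based lookahead scanner: consumes one whole emotion window
-- 	# (vowel / Y+vowel / LY+vowel) or root chunk per step instead of a
-- 	# char-by-char is_emotion state machine.
-- 	root = []
-- 	emotions = []
-- 	i = 0
-- 	n = len(word)
-- 	while i < n:
-- 		c = word[i]
-- 		if c in 'AIEUON':
-- 			emotions.append(c)
-- 			root.append('.')
-- 			i += 1
-- 		elif c == 'Y':
-- 			assert i + 1 < n
-- 			nxt = word[i + 1]
-- 			if nxt in 'AIEUON':
-- 				emotions.append('Y' + nxt)
-- 				root.append('.')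
-- 			else:
-- 				root.append('Y' + nxt)
-- 			i += 2
-- 		elif c == 'L':
-- 			assert i + 1 < n
-- 			if word[i + 1] == 'Y':
-- 				assert i + 2 < n
-- 				nxt = word[i + 2]
-- 				if nxt in 'AIEUON':
-- 					emotions.append('LY' + nxt)
-- 					root.append('.')
-- 				else:
-- 					root.append('LY' + nxt)
-- 				i += 3
-- 			else:
-- 				root.append('L' + word[i + 1])
-- 				i += 2
-- 		else:
-- 			root.append(c)
-- 			i += 1
-- 	return ''.join(root), emotions
-- ===== Notes on version B (the rewrite author's own statement) =====
-- stated objective: simpler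
-- what changed: Replaces A's char-by-char state machine with an is_emotion flag and a growing segment buffer by an index-based lookahead scanner that consumes a whole window (vowel / Y+char / LY+char / plain char) per iteration.
import Mathlib
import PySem

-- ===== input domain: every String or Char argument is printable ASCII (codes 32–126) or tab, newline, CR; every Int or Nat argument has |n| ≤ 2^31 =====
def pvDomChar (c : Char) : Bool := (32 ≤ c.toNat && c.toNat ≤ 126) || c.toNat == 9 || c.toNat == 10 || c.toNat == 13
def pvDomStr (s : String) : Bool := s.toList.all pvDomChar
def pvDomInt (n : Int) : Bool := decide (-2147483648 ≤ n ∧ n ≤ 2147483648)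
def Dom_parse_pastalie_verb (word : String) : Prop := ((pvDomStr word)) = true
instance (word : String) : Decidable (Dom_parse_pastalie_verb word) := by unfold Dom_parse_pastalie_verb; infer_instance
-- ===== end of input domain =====

-- B replaces A's char-by-char is_emotion state machine with a lookahead scanner that
-- consumes a whole emotion window (vowel / Y+c / LY+c) or root char per step (objective: simpler).

-- ===== PORT A =====
def pyVowels : List Char := ['A', 'I', 'E', 'U', 'O', 'N']

-- one iteration of A's for-loop; state = (root, emotions, segment, is_emotion)
def stepA (st : List Char × List String × List Char × Bool) (c : Char) :
    List Char × List String × List Char × Bool :=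
  match st with
  | (root, emotions, segment, isEmo) =>
    if !isEmo && decide (c ∈ pyVowels) then
      (root ++ segment ++ ['.'], emotions ++ [String.ofList [c]], [], false)
    else if !isEmo && decide (c ∈ (['L', 'Y'] : List Char)) then
      (root ++ segment, emotions, [c], true)
    else if isEmo then
      if segment = ['L'] then
        if c = 'Y' then (root, emotions, ['L', 'Y'], true)
        else (root, emotions, segment ++ [c], false)
      else if segment = ['Y'] ∨ segment = ['L', 'Y'] then
        if c ∈ pyVowels then
          (root ++ ['.'], emotions ++ [String.ofList (segment ++ [c])], [], false)
        else (root, emotions, segment ++ [c], false)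
      else (root, emotions, segment, isEmo)  -- Python: no inner branch fires, state unchanged
    else (root, emotions, segment ++ [c], false)

-- Python's trailing `assert not is_emotion` raises AssertionError exactly on the inputs
-- excluded by Pre_ below; the port returns root ++ segment regardless.
def parse_pastalie_verb (word : String) : String × List String :=
  let st := word.toList.foldl stepA ([], [], [], false)
  (String.ofList (st.1 ++ st.2.2.1), st.2.1)

-- ===== PORT B =====
-- Source B's while-loop with index i and lookahead, as structural recursion on the char list.
-- Where Source B raises AssertionError (word ends in an incomplete 'Y' / 'L' / 'LY' window —
-- excluded by Pre_ below) the port dumps the unconsumed tail into the root.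
def scanB : List Char → List Char × List String
  | [] => ([], [])
  | c :: rest =>
    if c ∈ pyVowels then
      ('.' :: (scanB rest).1, String.ofList [c] :: (scanB rest).2)
    else if c = 'Y' then
      match rest with
      | [] => (['Y'], [])  -- Python B: AssertionError (outside Pre_)
      | d :: rest2 =>
        if d ∈ pyVowels then
          ('.' :: (scanB rest2).1, String.ofList ['Y', d] :: (scanB rest2).2)
        else
          ('Y' :: d :: (scanB rest2).1, (scanB rest2).2)
    else if c = 'L' then
      match rest with
      | [] => (['L'], [])  -- Python B: AssertionError (outside Pre_)
      | d :: rest2 =>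
        if d = 'Y' then
          match rest2 with
          | [] => (['L', 'Y'], [])  -- Python B: AssertionError (outside Pre_)
          | e2 :: rest3 =>
            if e2 ∈ pyVowels then
              ('.' :: (scanB rest3).1, String.ofList ['L', 'Y', e2] :: (scanB rest3).2)
            else
              ('L' :: 'Y' :: e2 :: (scanB rest3).1, (scanB rest3).2)
        else
          ('L' :: d :: (scanB rest2).1, (scanB rest2).2)
    else
      (c :: (scanB rest).1, (scanB rest).2)

def parse_pastalie_verb_alt (word : String) : String × List String :=
  (String.ofList (scanB word.toList).1, (scanB word.toList).2)

-- ===== PRECONDITION & SPEC =====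
-- Pre_ excludes exactly the words on which Python A (and Python B) raise AssertionError:
-- the word ends mid-emotion-prefix, which happens precisely when the length of the
-- trailing run of 'L's plus the length of the run of 'Y's just before it is odd.
def Pre_parse_pastalie_verb (word : String) : Prop :=
  ((word.toList.reverse.takeWhile (· = 'L')).length
    + ((word.toList.reverse.dropWhile (· = 'L')).takeWhile (· = 'Y')).length) % 2 = 0
instance (word : String) : Decidable (Pre_parse_pastalie_verb word) := by
  unfold Pre_parse_pastalie_verb; infer_instance

def pvWitness_parse_pastalie_verb : String := "WASSYALYE.LL"

def Spec_parse_pastalie_verb (word : String) (out : String × List String) : Prop := out = parse_pastalie_verb_alt word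
instance (word : String) (out : String × List String) : Decidable (Spec_parse_pastalie_verb word out) := by unfold Spec_parse_pastalie_verb; infer_instance

-- ===== CLAIM (what is proved, stated in full; the proofs are below) =====
def Claim_equal_parse_pastalie_verb : Prop := ∀ (word : String), Dom_parse_pastalie_verb word → Pre_parse_pastalie_verb word → Spec_parse_pastalie_verb word (parse_pastalie_verb word)

-- ===== LEMMAS AND PROOFS =====

-- A's fold from any non-emotion state (root, em, seg, false) extracts to
-- root ++ seg ++ B's root and em ++ B's emotions; proved by recursion following
-- scanB's window structure (the ports in fact agree on every input, Pre_ or not).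
theorem foldA_scanB : ∀ (l : List Char) (root : List Char) (em : List String) (seg : List Char),
    ((List.foldl stepA (root, em, seg, false) l).1 ++ (List.foldl stepA (root, em, seg, false) l).2.2.1,
      (List.foldl stepA (root, em, seg, false) l).2.1)
      = (root ++ (seg ++ (scanB l).1), em ++ (scanB l).2)
  | [], root, em, seg => by simp [scanB, pyVowels]
  | c :: rest, root, em, seg => by
    by_cases hv : c ∈ pyVowels
    · have ih := foldA_scanB rest (root ++ seg ++ ['.']) (em ++ [String.ofList [c]]) []
      simp [pyVowels] at hv
      rcases hv with rfl | rfl | rfl | rfl | rfl | rfl <;>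
        · simp [stepA, scanB, pyVowels] at ih ⊢
          rw [scanB.eq_def]
          simp [pyVowels, ih]
    · by_cases hy : c = 'Y'
      · subst hy
        cases rest with
        | nil => simp [stepA, scanB, pyVowels]
        | cons d rest2 =>
          by_cases hdv : d ∈ pyVowels
          · have ih := foldA_scanB rest2 (root ++ seg ++ ['.']) (em ++ [String.ofList ['Y', d]]) []
            simp [pyVowels] at hdv
            rcases hdv with rfl | rfl | rfl | rfl | rfl | rfl <;>
              · simp [stepA, scanB, pyVowels] at ih ⊢
                rw [scanB.eq_def]
                simp [pyVowels, ih]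
          · have ih := foldA_scanB rest2 (root ++ seg) em ['Y', d]
            simp [pyVowels] at hdv
            simp [stepA, scanB, pyVowels, hdv] at ih ⊢
            rw [scanB.eq_def]
            simp [pyVowels, hdv, ih]
      · by_cases hl : c = 'L'
        · subst hl
          cases rest with
          | nil => simp [stepA, scanB, pyVowels]
          | cons d rest2 =>
            by_cases hdy : d = 'Y'
            · subst hdy
              cases rest2 with
              | nil => simp [stepA, scanB, pyVowels]
              | cons e2 rest3 =>
                by_cases hev : e2 ∈ pyVowels
                · have ih := foldA_scanB rest3 (root ++ seg ++ ['.']) (em ++ [String.ofList ['L', 'Y', e2]]) []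
                  simp [pyVowels] at hev
                  rcases hev with rfl | rfl | rfl | rfl | rfl | rfl <;>
                    · simp [stepA, pyVowels] at ih
                      rw [scanB.eq_def]
                      simp [stepA, pyVowels, ih]
                · have ih := foldA_scanB rest3 (root ++ seg) em ['L', 'Y', e2]
                  simp [pyVowels] at hev
                  rw [scanB.eq_def]
                  simp [stepA, pyVowels, hev] at ih ⊢
                  simp [ih]
            · have ih := foldA_scanB rest2 (root ++ seg) em ['L', d]
              simp [stepA, scanB, pyVowels, hdy] at ih ⊢
              rw [scanB.eq_def]
              simp [pyVowels, hdy, ih]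
        · have ih := foldA_scanB rest root em (seg ++ [c])
          simp [pyVowels] at hv
          simp [stepA, scanB, pyVowels, hv, hy, hl] at ih ⊢
          rw [scanB.eq_def]
          simp [pyVowels, hv, hy, hl, ih]
  termination_by l => l.length
  decreasing_by all_goals simp <;> omega

-- ===== VERDICT (by name: the statement is the Claim_ definition above) =====
theorem parse_pastalie_verb_spec : Claim_equal_parse_pastalie_verb := by
  intro word _ _
  unfold Spec_parse_pastalie_verb parse_pastalie_verb parse_pastalie_verb_alt
  have h := foldA_scanB word.toList [] [] []
  simp [Prod.ext_iff] at h
  simp [Prod.ext_iff, ← String.ofList_append, h.1, h.2]
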